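-- pv_equiv track=rewrite | github.com/ankushtale/MealDetectionforType1Diabetes | Features.py | HighRange
-- ===== SOURCE A (Python) =====
-- def HighRange(lst):
--     Max = float('-inf')
--     prev = lst[0]
--     maxlst = []
--     currentLst = [lst[0]]
--     current = 0
--     for i in range(1, len(lst)):
--         if prev <= lst[i]:
--             current += lst[i] - prev
--             currentLst.append(lst[i])
--         if prev > lst[i]:
--             if Max < current:
--                 Max = current
--                 maxlst = currentLst[:]
--             current = 0
--             currentLst = [lst[i]]
--         prev = lst[i]
--
--     if currentLst:
--         if Max < current:
--             Max = current
--             maxlst = currentLst[:]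
--     return Max, maxlst
-- ===== SOURCE B (Python) =====
-- def HighRange(lst):
--     # Phase 1: segment lst into maximal non-decreasing runs.
--     runs = []
--     current = [lst[0]]
--     for x in lst[1:]:
--         if current[-1] <= x:
--             current.append(x)
--         else:
--             runs.append(current)
--             current = [x]
--     runs.append(current)
--     # Phase 2: pick the run with the largest rise (last - first), first on ties.
--     best = runs[0]
--     for r in runs[1:]:
--         if r[-1] - r[0] > best[-1] - best[0]:
--             best = r
--     return best[-1] - best[0], best
-- ===== Notes on version B (the rewrite author's own statement) =====
-- stated objective: simpler
-- what changed: Replaces A's single monolithic loop over five pieces of mutable state (running increment sum, prev, current list, best-so-far pair) with a two-phase decomposition: first segment the list into maximal non-decreasing runs, then scan the runs for the one with the largest rise last-first (telescoping of A's accumulated increments), first on ties.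
import Mathlib
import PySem

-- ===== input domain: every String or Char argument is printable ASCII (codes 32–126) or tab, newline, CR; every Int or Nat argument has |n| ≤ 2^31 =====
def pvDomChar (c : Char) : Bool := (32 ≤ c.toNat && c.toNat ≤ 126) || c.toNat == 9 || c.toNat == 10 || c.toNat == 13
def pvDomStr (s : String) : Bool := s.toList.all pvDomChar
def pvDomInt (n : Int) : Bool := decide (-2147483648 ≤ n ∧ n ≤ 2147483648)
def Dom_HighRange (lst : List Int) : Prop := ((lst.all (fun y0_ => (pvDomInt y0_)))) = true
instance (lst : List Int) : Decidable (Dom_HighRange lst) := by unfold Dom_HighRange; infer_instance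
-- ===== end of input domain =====

-- B replaces A's one loop over five mutable variables by a two-phase decomposition
-- (segment into maximal non-decreasing runs, then pick the run with the largest rise);
-- same cost, simpler. Both raise IndexError on [], excluded by Pre_.

-- ===== PORT A =====
-- Python's Max starts at float('-inf'); modelled as Option Int (none = -inf).
def pvLtOpt (m : Option Int) (c : Int) : Bool :=
  match m with
  | none => true
  | some v => v < c

-- one iteration of A's for-loop; state = (Max, prev, maxlst, currentLst, current)
def pvStepA (st : Option Int × Int × List Int × List Int × Int) (x : Int) :
    Option Int × Int × List Int × List Int × Int :=
  let (Max, prev, maxlst, cur, current) := st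
  let (current, cur) := if prev ≤ x then (current + (x - prev), cur ++ [x]) else (current, cur)
  if prev > x then
    let (Max, maxlst) := if pvLtOpt Max current then (some current, cur) else (Max, maxlst)
    (Max, x, maxlst, [x], 0)
  else
    (Max, x, maxlst, cur, current)

def HighRange (lst : List Int) : Int × List Int :=
  match lst with
  | [] => (0, [])   -- Python raises IndexError here (lst[0]); excluded by Pre_HighRange
  | h :: t =>
    let s := t.foldl pvStepA (none, h, [], [h], 0)
    let (Max, _, maxlst, cur, current) := s
    if cur ≠ [] then
      if pvLtOpt Max current then (current, cur) else (Max.getD 0, maxlst)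
    else (Max.getD 0, maxlst)

-- ===== PORT B =====
-- rise of a (nonempty) run: last - first
def pvScore (r : List Int) : Int := r.getLast?.getD 0 - r.head?.getD 0

-- phase 1 step: extend the current run while non-decreasing, else close it
def pvStepB (st : List (List Int) × List Int) (x : Int) : List (List Int) × List Int :=
  let (runs, cur) := st
  if cur.getLast?.getD 0 ≤ x then (runs, cur ++ [x]) else (runs ++ [cur], [x])

-- phase 2 step: keep the run with strictly larger rise (first on ties)
def pvBest (b r : List Int) : List Int := if pvScore r > pvScore b then r else b

def HighRange_alt (lst : List Int) : Int × List Int :=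
  match lst with
  | [] => (0, [])   -- Python raises IndexError here (lst[0]); excluded by Pre_HighRange
  | h :: t =>
    let (runs, cur) := t.foldl pvStepB ([], [h])
    match runs ++ [cur] with
    | [] => (0, [])  -- unreachable: runs ++ [cur] is nonempty
    | r0 :: rest =>
      let best := rest.foldl pvBest r0
      (pvScore best, best)

-- ===== PRECONDITION & SPEC =====
-- Python A raises IndexError on the empty list (lst[0]); nothing else raises.
def Pre_HighRange (lst : List Int) : Prop := lst ≠ []
instance (lst : List Int) : Decidable (Pre_HighRange lst) := by unfold Pre_HighRange; infer_instance
def pvWitness_HighRange : List Int := ([3, 1, 2, 2, 0])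

def Spec_HighRange (lst : List Int) (out : Int × List Int) : Prop := out = HighRange_alt lst
instance (lst : List Int) (out : Int × List Int) : Decidable (Spec_HighRange lst out) := by unfold Spec_HighRange; infer_instance

-- ===== CLAIM (what is proved, stated in full; the proofs are below) =====
def Claim_equal_HighRange : Prop := ∀ (lst : List Int), Dom_HighRange lst → Pre_HighRange lst → Spec_HighRange lst (HighRange lst)

-- ===== LEMMAS AND PROOFS =====

-- A's (Max, maxlst) as a function of the list of closed runs
def pvSumm (runs : List (List Int)) : Option Int × List Int :=
  match runs with
  | [] => (none, [])
  | r0 :: rest => ((some (pvScore (rest.foldl pvBest r0)), rest.foldl pvBest r0))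

-- invariant linking A's loop state to B's
def pvInv (stA : Option Int × Int × List Int × List Int × Int)
    (stB : List (List Int) × List Int) : Prop :=
  stA.2.2.2.1 = stB.2 ∧ stB.2 ≠ [] ∧ stA.2.1 = stB.2.getLast?.getD 0 ∧
  stA.2.2.2.2 = pvScore stB.2 ∧ (stA.1, stA.2.2.1) = pvSumm stB.1

theorem pvScore_append (l : List Int) (x : Int) (h : l ≠ []) :
    pvScore (l ++ [x]) = pvScore l + (x - l.getLast?.getD 0) := by
  unfold pvScore
  rw [List.getLast?_append, List.head?_append_of_ne_nil _ h]
  simp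


theorem pvStep_inv (stA : Option Int × Int × List Int × List Int × Int)
    (stB : List (List Int) × List Int) (x : Int) (h : pvInv stA stB) :
    pvInv (pvStepA stA x) (pvStepB stB x) := by
  obtain ⟨Max, prev, maxlst, cur, current⟩ := stA
  obtain ⟨runs, curB⟩ := stB
  obtain ⟨h1, h2, h3, h4, h5⟩ := h
  simp only at h1 h2 h3 h4 h5
  subst h1 h3 h4
  unfold pvStepA pvStepB pvInv
  by_cases hle : cur.getLast?.getD 0 ≤ x
  · simp only [if_pos hle, if_neg (by omega : ¬ cur.getLast?.getD 0 > x)]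
    refine ⟨?_, ?_, ?_, ?_, ?_⟩
    · simp
    · simp
    · simp [List.getLast?_append]
    · simp [pvScore_append cur x h2]
    · exact h5
  · simp only [if_neg hle, if_pos (by omega : cur.getLast?.getD 0 > x)]
    refine ⟨?_, ?_, ?_, ?_, ?_⟩
    · simp
    · simp
    · simp
    · simp [pvScore]
    cases runs with
    | nil =>
      simp only [pvSumm, Prod.mk.injEq] at h5
      obtain ⟨e1, e2⟩ := h5; subst e1 e2
      simp [pvLtOpt, pvSumm]
    | cons r0 rest =>
      simp only [pvSumm, Prod.mk.injEq] at h5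
      obtain ⟨e1, e2⟩ := h5; subst e1 e2
      simp only [pvSumm, List.cons_append, List.foldl_append, List.foldl_cons, List.foldl_nil,
        pvLtOpt, pvBest]
      by_cases hlt : pvScore (rest.foldl pvBest r0) < pvScore cur
      · simp [hlt]
      · simp [hlt]

theorem pvFoldl_inv (t : List Int) (stA : Option Int × Int × List Int × List Int × Int)
    (stB : List (List Int) × List Int) (h : pvInv stA stB) :
    pvInv (t.foldl pvStepA stA) (t.foldl pvStepB stB) := by
  induction t generalizing stA stB with
  | nil => exact h
  | cons x xs ih => exact ih _ _ (pvStep_inv _ _ x h)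

theorem HighRange_spec : Claim_equal_HighRange := by
  intro lst _ hpre
  unfold Spec_HighRange
  match lst with
  | [] => exact absurd rfl hpre
  | h :: t =>
    have hinv := pvFoldl_inv t (none, h, [], [h], 0) ([], [h])
      (by simp [pvInv, pvScore, pvSumm])
    unfold HighRange HighRange_alt
    rcases hA : t.foldl pvStepA (none, h, [], [h], 0) with ⟨Max, prev, maxlst, cur, current⟩
    rcases hB : t.foldl pvStepB ([], [h]) with ⟨runs, curB⟩
    rw [hA, hB] at hinv
    obtain ⟨h1, h2, _, h4, h5⟩ := hinv
    simp only at h1 h2 h4 h5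
    subst h1 h4
    simp only [hA, hB]
    cases runs with
    | nil =>
      simp only [pvSumm, Prod.mk.injEq] at h5
      obtain ⟨e1, e2⟩ := h5; subst e1 e2
      simp [h2, pvLtOpt]
    | cons r0 rest =>
      simp only [pvSumm, Prod.mk.injEq] at h5
      obtain ⟨e1, e2⟩ := h5; subst e1 e2
      simp only [ne_eq, h2, not_false_iff, if_true, List.cons_append, List.foldl_append,
        List.foldl_cons, List.foldl_nil, pvLtOpt, pvBest]
      by_cases hlt : pvScore (rest.foldl pvBest r0) < pvScore cur
      · simp [hlt]
      · simp [hlt]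

-- ===== VERDICT (by name: the statement is the Claim_ definition above) =====
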